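-- pv_equiv track=rewrite | github.com/ManikantaPerla07/AI-Surveillance-System | app.py | calculate_threat
-- ===== SOURCE A (Python) =====
-- THREAT_CLASSES = {"cell phone": 85, "laptop": 70, "book": 55, "tablet": 65}
--
-- def calculate_threat(detections):
--     """Calculate threat 0-100."""
--     threat = 0
--     for det in detections:
--         label = det["label"]
--         if label in THREAT_CLASSES:
--             threat += THREAT_CLASSES[label]
--         elif label == "person":
--             threat += 20
--         else:
--             threat += 10
--     return min(threat, 100)
-- ===== SOURCE B (Python) =====
-- THREAT_CLASSES = {"cell phone": 85, "laptop": 70, "book": 55, "tablet": 65}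
--
--
-- def _unit_weight(label):
--     return THREAT_CLASSES.get(label, 20 if label == "person" else 10)
--
--
-- def calculate_threat(detections):
--     """Calculate threat 0-100."""
--     counts = {}
--     for det in detections:
--         label = det["label"]
--         counts[label] = counts.get(label, 0) + 1
--     threat = sum(_unit_weight(label) * n for label, n in counts.items())
--     return min(threat, 100)
-- ===== Notes on version B (the rewrite author's own statement) =====
-- stated objective: alternative
-- what changed: B first builds a label->frequency table in one pass, then sums unit_weight(label)*count over the distinct labels (unit weight via a single dict.get with a computed default), instead of A's per-detection if/elif/else accumulation.
import Mathlib
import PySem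

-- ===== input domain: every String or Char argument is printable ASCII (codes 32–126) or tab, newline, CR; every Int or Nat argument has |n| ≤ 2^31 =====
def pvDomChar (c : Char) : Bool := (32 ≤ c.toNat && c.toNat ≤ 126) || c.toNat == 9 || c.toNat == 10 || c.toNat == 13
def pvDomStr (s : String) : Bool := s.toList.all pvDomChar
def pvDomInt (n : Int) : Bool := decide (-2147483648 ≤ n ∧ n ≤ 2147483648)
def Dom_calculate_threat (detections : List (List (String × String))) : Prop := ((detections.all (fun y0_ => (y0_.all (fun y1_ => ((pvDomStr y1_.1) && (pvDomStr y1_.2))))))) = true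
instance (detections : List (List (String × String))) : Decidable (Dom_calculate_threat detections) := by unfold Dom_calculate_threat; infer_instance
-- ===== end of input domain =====

-- B builds a label->count table first and then weighs the distinct labels; same O(n), alternative decomposition.

def THREAT_CLASSES : PySem.Dict String Int :=
  PySem.Dict.ofList [("cell phone", 85), ("laptop", 70), ("book", 55), ("tablet", 65)]

-- ===== PORT A =====
def calculate_threat (detections : List (List (String × String))) : Int :=
  let threat : Int := detections.foldl (fun threat det =>
    match (PySem.Dict.mk det).get? "label" with
    | none => threat   -- Python raises KeyError here; excluded by Pre_
    | some label =>
      if THREAT_CLASSES.contains label then threat + THREAT_CLASSES.getD label 0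
      else if label == "person" then threat + 20
      else threat + 10) 0
  min threat 100

-- ===== PORT B =====
def unit_weight (label : String) : Int :=
  THREAT_CLASSES.getD label (if label == "person" then 20 else 10)

def calculate_threat_alt (detections : List (List (String × String))) : Int :=
  let counts : PySem.Dict String Int := detections.foldl (fun counts det =>
    match (PySem.Dict.mk det).get? "label" with
    | none => counts   -- Python raises KeyError here; excluded by Pre_
    | some label => counts.insert label (counts.getD label 0 + 1)) PySem.Dict.empty
  let threat : Int := counts.items.foldl (fun t p => t + unit_weight p.1 * p.2) 0
  min threat 100

-- ===== PRECONDITION & SPEC =====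
-- Pre_: every detection dict has a "label" key (otherwise Python A raises KeyError).
def Pre_calculate_threat (detections : List (List (String × String))) : Prop :=
  (detections.all (fun det => det.any (fun p => p.1 == "label"))) = true
instance (detections : List (List (String × String))) : Decidable (Pre_calculate_threat detections) := by
  unfold Pre_calculate_threat; infer_instance
def pvWitness_calculate_threat : (List (List (String × String))) :=
  [[("label", "person")], [("label", "laptop")]]

def Spec_calculate_threat (detections : List (List (String × String))) (out : Int) : Prop := out = calculate_threat_alt detections
instance (detections : List (List (String × String))) (out : Int) : Decidable (Spec_calculate_threat detections out) := by unfold Spec_calculate_threat; infer_instance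

-- ===== CLAIM (what is proved, stated in full; the proofs are below) =====
def Claim_equal_calculate_threat : Prop := ∀ (detections : List (List (String × String))), Dom_calculate_threat detections → Pre_calculate_threat detections → Spec_calculate_threat detections (calculate_threat detections)

-- ===== LEMMAS AND PROOFS =====

-- the labels A iterates over (missing-key detections dropped; none inside Pre_)
def pvLabels (detections : List (List (String × String))) : List String :=
  detections.filterMap (fun det => (PySem.Dict.mk det).get? "label")

-- A's branch chain adds exactly unit_weight
theorem unit_weight_cases (t : Int) (l : String) :
    (if THREAT_CLASSES.contains l then t + THREAT_CLASSES.getD l 0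
     else if l == "person" then t + 20
     else t + 10) = t + unit_weight l := by
  unfold unit_weight
  by_cases h : THREAT_CLASSES.contains l = true
  · simp only [h, if_true]
    rw [PySem.Dict.contains_eq_isSome_get?] at h
    cases hg : THREAT_CLASSES.get? l with
    | none => simp [hg] at h
    | some v =>
      rw [PySem.Dict.getD_of_get?_eq_some THREAT_CLASSES _ hg,
          PySem.Dict.getD_of_get?_eq_some THREAT_CLASSES _ hg]
  · have h' : THREAT_CLASSES.contains l = false := by simpa using h
    rw [PySem.Dict.getD_of_not_contains THREAT_CLASSES
          (if l == "person" then (20 : Int) else 10) h']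
    simp only [h', Bool.false_eq_true, if_false]
    split_ifs <;> rfl

-- A's loop sums unit_weight over the labels
theorem a_fold (detections : List (List (String × String))) : ∀ (t : Int),
    detections.foldl (fun threat det =>
      match (PySem.Dict.mk det).get? "label" with
      | none => threat
      | some label =>
        if THREAT_CLASSES.contains label then threat + THREAT_CLASSES.getD label 0
        else if label == "person" then threat + 20
        else threat + 10) t
    = t + ((pvLabels detections).map unit_weight).sum := by
  induction detections with
  | nil => intro t; simp [pvLabels]
  | cons det rest ih =>
    intro t
    simp only [pvLabels, List.filterMap_cons] at ih ⊢
    cases hg : (PySem.Dict.mk det).get? "label" with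
    | none =>
      simp only [List.foldl_cons, hg]
      exact ih t
    | some label =>
      simp only [List.foldl_cons, hg, List.map_cons, List.sum_cons]
      rw [ih, unit_weight_cases t label]
      ring

-- the summed value of a counter dict
def pvT (c : PySem.Dict String Int) : Int :=
  (c.items.map (fun p => unit_weight p.1 * p.2)).sum

-- bumping one present key adds one unit weight to the sum
theorem bump_sum (its : List (String × Int)) (l : String) (v : Int)
    (hnd : (its.map Prod.fst).Nodup) (hmem : (l, v) ∈ its) :
    ((its.map (fun p => if p.1 == l then (l, v + 1) else p)).map
        (fun p => unit_weight p.1 * p.2)).sum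
      = (its.map (fun p => unit_weight p.1 * p.2)).sum + unit_weight l := by
  induction its with
  | nil => simp at hmem
  | cons hd rest ih =>
    simp only [List.map_cons, List.nodup_cons, List.mem_cons] at hnd hmem ⊢
    by_cases hk : hd.1 = l
    · have hrest : ∀ p ∈ rest, ¬ (p.1 == l) := by
        intro p hp
        simp only [beq_iff_eq]
        intro he
        exact hnd.1 (hk ▸ he ▸ (List.mem_map_of_mem hp))
      have hmap : rest.map (fun p => if p.1 == l then (l, v + 1) else p) = rest := by
        apply List.map_congr_left ?_ |>.trans (List.map_id rest)
        intro p hp; simp [hrest p hp]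
      rcases hmem with hmem | hmem
      · subst hmem
        simp only [List.sum_cons, hmap, hk, beq_self_eq_true, if_true]
        ring
      · exact absurd (hk ▸ List.mem_map_of_mem hmem (f := Prod.fst)) hnd.1
    · have hmem' : (l, v) ∈ rest := by
        rcases hmem with hmem | hmem
        · exact absurd (congrArg Prod.fst hmem.symm) hk
        · exact hmem
      have hne : ¬ (hd.1 == l) := by simp [hk]
      simp only [hne, Bool.false_eq_true, if_false, List.sum_cons, ih hnd.2 hmem']
      ring

-- one counter step adds one unit weight
theorem pvT_insert (c : PySem.Dict String Int) (l : String) (hnd : c.keys.Nodup) :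
    pvT (c.insert l (c.getD l 0 + 1)) = pvT c + unit_weight l := by
  unfold pvT
  by_cases h : c.contains l = true
  · rw [PySem.Dict.items_insert_of_contains c _ h]
    rw [PySem.Dict.contains_eq_isSome_get?] at h
    cases hg : c.get? l with
    | none => simp [hg] at h
    | some v =>
      rw [PySem.Dict.getD_of_get?_eq_some c _ hg]
      exact bump_sum c.items l v hnd (PySem.Dict.mem_items_of_get?_eq_some c hg)
  · rw [PySem.Dict.items_insert_of_not_contains c _ (by simpa using h),
        PySem.Dict.getD_of_not_contains c _ (by simpa using h)]
    simp

-- B's counting loop, summed, equals the label-by-label sum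
theorem b_fold (ls : List String) : ∀ (c : PySem.Dict String Int), c.keys.Nodup →
    pvT (ls.foldl (fun c l => c.insert l (c.getD l 0 + 1)) c)
      = pvT c + (ls.map unit_weight).sum := by
  induction ls with
  | nil => intro c _; simp
  | cons l rest ih =>
    intro c hnd
    simp only [List.foldl_cons, List.map_cons, List.sum_cons]
    rw [ih _ (PySem.Dict.nodup_keys_insert _ _ _ hnd), pvT_insert c l hnd]
    ring

-- B's detection loop is the counting loop over the labels
theorem b_counts (detections : List (List (String × String))) :
    ∀ (c : PySem.Dict String Int),
    detections.foldl (fun counts det =>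
      match (PySem.Dict.mk det).get? "label" with
      | none => counts
      | some label => counts.insert label (counts.getD label 0 + 1)) c
    = (pvLabels detections).foldl (fun c l => c.insert l (c.getD l 0 + 1)) c := by
  induction detections with
  | nil => intro c; simp [pvLabels]
  | cons det rest ih =>
    intro c
    simp only [pvLabels, List.filterMap_cons] at ih ⊢
    cases hg : (PySem.Dict.mk det).get? "label" with
    | none => simp only [List.foldl_cons, hg]; exact ih c
    | some label => simp only [List.foldl_cons, hg]; exact ih _

theorem foldl_add_items (its : List (String × Int)) : ∀ (t : Int),
    its.foldl (fun t p => t + unit_weight p.1 * p.2) t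
      = t + (its.map (fun p => unit_weight p.1 * p.2)).sum := by
  induction its with
  | nil => intro t; simp
  | cons hd rest ih => intro t; simp [ih]; ring

-- ===== VERDICT (by name: the statement is the Claim_ definition above) =====
theorem calculate_threat_spec : Claim_equal_calculate_threat := by
  intro detections _ _
  unfold Spec_calculate_threat calculate_threat calculate_threat_alt
  dsimp only
  rw [a_fold detections 0, b_counts detections PySem.Dict.empty, foldl_add_items]
  have hb := b_fold (pvLabels detections) PySem.Dict.empty (by simp)
  simp only [pvT] at hb
  rw [hb]
  simp [PySem.Dict.empty]
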